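-- pv_equiv track=rewrite | github.com/zoe-j-m/advent_of_code_2023 | day03.py | check
-- ===== SOURCE A (Python) =====
-- from typing import List, Optional, Tuple
--
-- def check(lines: List[str], from_col : int, to_col : int, row: int) -> bool:
--     max_row = len(lines) - 1
--     i_from, i_to = max(0, from_col - 1), min(len(lines[0]) - 1, to_col + 1)
--     for i in range(i_from, i_to + 1):
--         if row > 0:
--             if lines[row - 1][i] != '.':
--                 return True
--         if row < max_row:
--             if lines[row + 1][i] != '.':
--                  return True
--         if (i == i_from and from_col !=0) or (i == i_to and to_col != len(lines[0])-1):
--             if lines[row][i] != '.':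
--                 return True
--     return False
-- ===== SOURCE B (Python) =====
-- def check(lines, from_col, to_col, row):
--     w = len(lines[0])
--     i_from, i_to = max(0, from_col - 1), min(w - 1, to_col + 1)
--     if i_from > i_to:
--         return False
--     neigh = ""
--     if row > 0:
--         neigh += lines[row - 1][i_from:i_to + 1]
--     if row < len(lines) - 1:
--         neigh += lines[row + 1][i_from:i_to + 1]
--     if from_col != 0:
--         neigh += lines[row][i_from]
--     if to_col != w - 1:
--         neigh += lines[row][i_to]
--     return any(c != '.' for c in neigh)
-- ===== Notes on version B (the rewrite author's own statement) =====
-- stated objective: simpler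
-- what changed: B replaces A's per-cell index loop with three guard tests per iteration by extracting the above/below row slices and the two same-row flank characters once into one neighbour string and doing a single any(c != '.') scan, with an early False when the clipped region is empty.
-- outside the precondition, e.g. on check(['#'], 1, 1, 1): A returns True, B raises IndexError; on check(['##', '#'], 2, 1, 1): A returns True, B raises IndexError
import Mathlib
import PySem

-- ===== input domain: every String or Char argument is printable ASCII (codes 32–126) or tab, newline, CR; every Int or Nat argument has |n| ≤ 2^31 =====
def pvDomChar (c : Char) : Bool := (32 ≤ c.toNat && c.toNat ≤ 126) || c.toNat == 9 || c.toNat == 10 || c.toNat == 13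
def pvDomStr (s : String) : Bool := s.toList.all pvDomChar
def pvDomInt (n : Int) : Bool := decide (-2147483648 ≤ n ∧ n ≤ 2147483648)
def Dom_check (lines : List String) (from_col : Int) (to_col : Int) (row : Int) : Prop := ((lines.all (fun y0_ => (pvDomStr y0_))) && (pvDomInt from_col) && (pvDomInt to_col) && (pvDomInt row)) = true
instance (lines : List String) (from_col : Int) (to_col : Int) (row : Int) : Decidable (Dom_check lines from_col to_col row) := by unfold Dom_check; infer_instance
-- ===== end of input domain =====

-- B replaces A's per-cell index loop with three guard tests per cell by slicing the rows
-- above/below once, appending the two same-row flank characters, and one any-scan ('simpler').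

-- lines[r] as a list of chars (default only outside Pre_, where Python raises)
def lineAt (lines : List String) (r : Int) : List Char :=
  (PySem.List.pyGetD lines r "").toList

-- lines[r][i] (default only outside Pre_, where Python raises)
def charAt (lines : List String) (r : Int) (i : Int) : Char :=
  PySem.List.pyGetD (lineAt lines r) i '.'

-- ===== PORT A =====
-- the for-loop with early returns, as structural recursion over the index list
def checkLoop (lines : List String) (from_col to_col row max_row w i_from i_to : Int) :
    List Int → Bool
  | [] => false
  | i :: rest =>
    if decide (row > 0) && (charAt lines (row - 1) i != '.') then true
    else if decide (row < max_row) && (charAt lines (row + 1) i != '.') then true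
    else if ((i == i_from && decide (from_col ≠ 0)) ||
             (i == i_to && decide (to_col ≠ w - 1))) && (charAt lines row i != '.') then true
    else checkLoop lines from_col to_col row max_row w i_from i_to rest

def check (lines : List String) (from_col : Int) (to_col : Int) (row : Int) : Bool :=
  let max_row : Int := (lines.length : Int) - 1
  let w : Int := ((lineAt lines 0).length : Int)
  let i_from : Int := max 0 (from_col - 1)
  let i_to : Int := min (w - 1) (to_col + 1)
  checkLoop lines from_col to_col row max_row w i_from i_to
    (PySem.List.pyRange i_from (i_to + 1) 1)

-- ===== PORT B =====
def check_alt (lines : List String) (from_col : Int) (to_col : Int) (row : Int) : Bool :=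
  let w : Int := ((lineAt lines 0).length : Int)
  let i_from : Int := max 0 (from_col - 1)
  let i_to : Int := min (w - 1) (to_col + 1)
  if i_from > i_to then false
  else
    let neigh : List Char :=
      (if row > 0 then PySem.List.slice (lineAt lines (row - 1)) (some i_from) (some (i_to + 1)) else []) ++
      ((if row < (lines.length : Int) - 1 then PySem.List.slice (lineAt lines (row + 1)) (some i_from) (some (i_to + 1)) else []) ++
       ((if from_col ≠ 0 then [charAt lines row i_from] else []) ++
        (if to_col ≠ w - 1 then [charAt lines row i_to] else [])))
    neigh.any (fun c => c != '.')

-- ===== PRECONDITION & SPEC =====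
-- Pre_ requires a nonempty lines and, unless the clipped column range is already empty
-- (then neither program touches any row), that row is inside [-len(lines), len(lines)-1]
-- and every row the scan touches reaches past the clipped range: outside that A raises
-- IndexError, or returns True early only because the raise it was about to hit is cut off
-- by scan order — an accident that B (which gathers all neighbours first) may not reach,
-- raising instead.
def Pre_check (lines : List String) (from_col : Int) (to_col : Int) (row : Int) : Prop :=
  lines ≠ [] ∧
  (min (((lines.headD "").toList.length : Int) - 1) (to_col + 1) < max 0 (from_col - 1) ∨
   (-(lines.length : Int) ≤ row ∧ row < (lines.length : Int) ∧
    (row > 0 → min (((lines.headD "").toList.length : Int) - 1) (to_col + 1) + 1 ≤ ((lineAt lines (row - 1)).length : Int)) ∧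
    (row < (lines.length : Int) - 1 → min (((lines.headD "").toList.length : Int) - 1) (to_col + 1) + 1 ≤ ((lineAt lines (row + 1)).length : Int)) ∧
    ((from_col ≠ 0 ∨ to_col ≠ ((lines.headD "").toList.length : Int) - 1) → min (((lines.headD "").toList.length : Int) - 1) (to_col + 1) + 1 ≤ ((lineAt lines row).length : Int))))

instance (lines : List String) (from_col : Int) (to_col : Int) (row : Int) :
    Decidable (Pre_check lines from_col to_col row) := by unfold Pre_check; infer_instance

def pvWitness_check : List String × Int × Int × Int := (["#.", ".."], 0, 0, 1)

def Spec_check (lines : List String) (from_col : Int) (to_col : Int) (row : Int) (out : Bool) : Prop := out = check_alt lines from_col to_col row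
instance (lines : List String) (from_col : Int) (to_col : Int) (row : Int) (out : Bool) : Decidable (Spec_check lines from_col to_col row out) := by unfold Spec_check; infer_instance

-- ===== CLAIM (what is proved, stated in full; the proofs are below) =====
def Claim_equal_check : Prop := ∀ (lines : List String) (from_col : Int) (to_col : Int) (row : Int), Dom_check lines from_col to_col row → Pre_check lines from_col to_col row → Spec_check lines from_col to_col row (check lines from_col to_col row)

-- ===== LEMMAS AND PROOFS =====

-- the early-return loop is List.any of the disjunction of its three conditions
lemma checkLoop_eq_any (lines : List String) (f t r mr w i_from i_to : Int) (l : List Int) :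
    checkLoop lines f t r mr w i_from i_to l =
      l.any (fun i =>
        (decide (r > 0) && (charAt lines (r - 1) i != '.')) ||
        ((decide (r < mr) && (charAt lines (r + 1) i != '.')) ||
         (((i == i_from && decide (f ≠ 0)) || (i == i_to && decide (t ≠ w - 1))) &&
          (charAt lines r i != '.')))) := by
  induction l with
  | nil => simp [checkLoop]
  | cons i rest ih =>
    rw [checkLoop, ih, List.any_cons]
    split_ifs <;> simp_all

lemma any_or' {α : Type} (l : List α) (f g : α → Bool) :
    l.any (fun i => f i || g i) = (l.any f || l.any g) := by
  induction l with
  | nil => simp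
  | cons a l ih =>
    simp [ih]
    cases f a <;> cases g a <;> simp

lemma any_const_and {α : Type} (l : List α) (c : Bool) (f : α → Bool) :
    l.any (fun i => c && f i) = (c && l.any f) := by
  cases c <;> simp

lemma any_beq_and (l : List Int) (i0 : Int) (f : Int → Bool) (h : i0 ∈ l) :
    l.any (fun i => (i == i0) && f i) = f i0 := by
  cases hf : f i0 with
  | true => exact List.any_eq_true.mpr ⟨i0, h, by simp [hf]⟩
  | false =>
    rw [List.any_eq_false]
    intro i hi
    by_cases hii : i = i0 <;> simp [hii, hf]

lemma slice_eq_map (xs : List Char) (n : Nat) :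
    ∀ (a b : Int), 0 ≤ a → 0 ≤ b → b ≤ (xs.length : Int) → (b - a).toNat = n →
      PySem.List.slice xs (some a) (some b) =
        (PySem.List.pyRange a b 1).map (fun i => PySem.List.pyGetD xs i '.') := by
  induction n with
  | zero =>
    intro a b ha hb hbl hn
    rw [PySem.List.slice_toNat xs ha hb, PySem.List.pyRange_one_eq_nil (by omega)]
    have : b.toNat - a.toNat = 0 := by omega
    simp [this]
  | succ n ih =>
    intro a b ha hb hbl hn
    have hab : a < b := by omega
    have hal : a.toNat < xs.length := by omega
    rw [PySem.List.slice_toNat xs ha hb, PySem.List.pyRange_one_cons hab, List.map_cons]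
    have h1 : b.toNat - a.toNat = n + 1 := by omega
    rw [h1, List.drop_eq_getElem_cons hal, List.take_succ_cons]
    have h2 : PySem.List.pyGetD xs a '.' = xs[a.toNat] :=
      PySem.List.pyGetD_eq_getElem xs '.' ha (by omega)
    rw [h2]
    congr 1
    have h3 := ih (a + 1) b (by omega) hb hbl (by omega)
    rw [PySem.List.slice_toNat xs (by omega : (0:Int) ≤ a + 1) hb] at h3
    have h4 : (a + 1).toNat = a.toNat + 1 := by omega
    rw [h4] at h3
    rw [← h3]
    congr 1
    omega

lemma any_ite (c : Prop) [Decidable c] (l : List Char) (p : Char → Bool) :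
    (if c then l else []).any p = (decide c && l.any p) := by
  split_ifs <;> simp_all

theorem check_eq (lines : List String) (from_col to_col row : Int)
    (hpre : Pre_check lines from_col to_col row) :
    check lines from_col to_col row = check_alt lines from_col to_col row := by
  obtain ⟨hne, hor⟩ := hpre
  rw [check, check_alt]
  have hw0 : ((lineAt lines 0).length : Int) = ((lines.headD "").toList.length : Int) := by
    cases lines with
    | nil => exact absurd rfl hne
    | cons a l => simp [lineAt, PySem.List.pyGetD_zero_cons]
  rw [hw0]
  generalize hW : ((lines.headD "").toList.length : Int) = W at hor ⊢
  generalize hF : max 0 (from_col - 1) = i_from at hor ⊢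
  generalize hT : min (W - 1) (to_col + 1) = i_to at hor ⊢
  have hF' : i_from = max 0 (from_col - 1) := hF.symm
  have hT' : i_to = min (W - 1) (to_col + 1) := hT.symm
  by_cases hfi : i_from ≤ i_to
  case neg =>
    rw [if_pos (by omega), checkLoop_eq_any, PySem.List.pyRange_one_eq_nil (by omega)]
    simp
  case pos =>
  obtain ⟨hr0, hrl, hup, hdn, hfl⟩ := hor.resolve_left (by omega)
  rw [if_neg (by omega)]
  have hmemf : i_from ∈ PySem.List.pyRange i_from (i_to + 1) 1 :=
    PySem.List.mem_pyRange_one.mpr ⟨le_rfl, by omega⟩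
  have hmemt : i_to ∈ PySem.List.pyRange i_from (i_to + 1) 1 :=
    PySem.List.mem_pyRange_one.mpr ⟨hfi, by omega⟩
  rw [checkLoop_eq_any, any_or', any_or']
  have hdist :
      (fun i => (((i == i_from && decide (from_col ≠ 0)) ||
                  (i == i_to && decide (to_col ≠ W - 1))) && (charAt lines row i != '.'))) =
      (fun i => ((i == i_from) && (decide (from_col ≠ 0) && (charAt lines row i != '.'))) ||
                ((i == i_to) && (decide (to_col ≠ W - 1) && (charAt lines row i != '.')))) := by
    funext i
    cases i == i_from <;> cases i == i_to <;>
      cases charAt lines row i != '.' <;> simp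
  rw [hdist, any_or', any_beq_and _ _ _ hmemf, any_beq_and _ _ _ hmemt]
  rw [any_const_and, any_const_and]
  rw [List.any_append, List.any_append, List.any_append, any_ite, any_ite, any_ite, any_ite]
  by_cases h1 : row > 0
  · by_cases h2 : row < (lines.length : Int) - 1
    · have e1 : PySem.List.slice (lineAt lines (row - 1)) (some i_from) (some (i_to + 1)) =
          (PySem.List.pyRange i_from (i_to + 1) 1).map
            (fun i => PySem.List.pyGetD (lineAt lines (row - 1)) i '.') :=
        slice_eq_map _ _ i_from (i_to + 1) (by omega) (by omega)
          (by have := hup h1; omega) rfl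
      have e2 : PySem.List.slice (lineAt lines (row + 1)) (some i_from) (some (i_to + 1)) =
          (PySem.List.pyRange i_from (i_to + 1) 1).map
            (fun i => PySem.List.pyGetD (lineAt lines (row + 1)) i '.') :=
        slice_eq_map _ _ i_from (i_to + 1) (by omega) (by omega)
          (by have := hdn h2; omega) rfl
      simp [h1, h2, e1, e2, List.any_map, charAt, Function.comp_def]
    · have e1 : PySem.List.slice (lineAt lines (row - 1)) (some i_from) (some (i_to + 1)) =
          (PySem.List.pyRange i_from (i_to + 1) 1).map
            (fun i => PySem.List.pyGetD (lineAt lines (row - 1)) i '.') :=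
        slice_eq_map _ _ i_from (i_to + 1) (by omega) (by omega)
          (by have := hup h1; omega) rfl
      simp [h1, h2, e1, List.any_map, charAt, Function.comp_def]
  · by_cases h2 : row < (lines.length : Int) - 1
    · have e2 : PySem.List.slice (lineAt lines (row + 1)) (some i_from) (some (i_to + 1)) =
          (PySem.List.pyRange i_from (i_to + 1) 1).map
            (fun i => PySem.List.pyGetD (lineAt lines (row + 1)) i '.') :=
        slice_eq_map _ _ i_from (i_to + 1) (by omega) (by omega)
          (by have := hdn h2; omega) rfl
      simp [h1, h2, e2, List.any_map, charAt, Function.comp_def]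
    · simp [h1, h2]

-- ===== VERDICT (by name: the statement is the Claim_ definition above) =====
theorem check_spec : Claim_equal_check := by
  intro lines from_col to_col row _ hpre
  exact check_eq lines from_col to_col row hpre
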